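-- pv_equiv track=rewrite | github.com/pypi-data/pypi-mirror-275 | packages/number2text/number2text-0.0.1.tar.gz/number2text-0.0.1/number2text/lang/be.py | convert
-- ===== SOURCE A (Python) =====
-- _ones= ["", "ཞིག་", "གཉིས་", "གསུམ་", "བཞི་", "ལྔ་", "དྲུག་", "བདུན་", "བརྒྱད་", "དགུ་"]
--
-- _tens = ["", "བཅུ་", "ཉི་ཤུ་", "སུམ་ཅུ་", "བཞི་བཅུ་", "ལྔ་བཅུ་", "དྲུག་ཅུ་", "བདུན་ཅུ་", "བརྒྱད་ཅུ་", "དགུ་བཅུ་"]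
--
-- _hundreds = ["", "བརྒྱ་", "ཉིས་བརྒྱ་", "སུམ་བརྒྱ་", "བཞི་བརྒྱ་", "ལྔ་བརྒྱ་", "དྲུག་བརྒྱ་", "བདུན་བརྒྱ་", "བརྒྱད་བརྒྱ་", "དགུ་བརྒྱ་"]
--
-- _thousands = ["", "སྟོང་", "ཁྲི་", "འབུམ་", "ས་ཡ་", "བྱེ་བ་", "དུང་ཕྱུར་", "ས་ཡ་ཕྲག་", "བྱེ་བ་ཕྲག་", "དུང་ཕྱུར་ཕྲག་"]
--
-- def convert_less_than_thousand(number):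
--     if number < 10:
--         return _ones[number]
--     elif number < 100:
--         tens, ones = divmod(number, 10)
--         if ones == 0:
--             return _tens[tens]
--         else:
--             return _tens[tens] + _ones[ones]
--     else:
--         hundreds, less_than_hundred = divmod(number, 100)
--         if less_than_hundred == 0:
--             return _hundreds[hundreds]
--         else:
--             return _hundreds[hundreds] + convert_less_than_thousand(less_than_hundred)
--
-- def convert(number):
--     if number == 0:
--         return "ཀླད་ཀོར་"
--
--     if number < 0:
--         return "ཉུང་ཤོས་" + convert(-number)
--
--     parts = []
--     thousand_index = 0
--     while number > 0:
--         if number % 1000 != 0: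
--             part = convert_less_than_thousand(number % 1000)
--             if thousand_index > 0:
--                 part += _thousands[thousand_index]
--             parts.append(part)
--         number //= 1000
--         thousand_index += 1
--
--     return "".join(reversed(parts))
-- ===== SOURCE B (Python) =====
-- _ones= ["", "ཞིག་", "གཉིས་", "གསུམ་", "བཞི་", "ལྔ་", "དྲུག་", "བདུན་", "བརྒྱད་", "དགུ་"]
--
-- _tens = ["", "བཅུ་", "ཉི་ཤུ་", "སུམ་ཅུ་", "བཞི་བཅུ་", "ལྔ་བཅུ་", "དྲུག་ཅུ་", "བདུན་ཅུ་", "བརྒྱད་ཅུ་", "དགུ་བཅུ་"]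
--
-- _hundreds = ["", "བརྒྱ་", "ཉིས་བརྒྱ་", "སུམ་བརྒྱ་", "བཞི་བརྒྱ་", "ལྔ་བརྒྱ་", "དྲུག་བརྒྱ་", "བདུན་བརྒྱ་", "བརྒྱད་བརྒྱ་", "དགུ་བརྒྱ་"]
--
-- _thousands = ["", "སྟོང་", "ཁྲི་", "འབུམ་", "ས་ཡ་", "བྱེ་བ་", "དུང་ཕྱུར་", "ས་ཡ་ཕྲག་", "བྱེ་བ་ཕྲག་", "དུང་ཕྱུར་ཕྲག་"]
--
--
-- def _group(n):
--     # three-digit n: one table lookup per decimal digit (the empty entries at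
--     # index 0 make zero digits disappear), no branching, no recursion
--     return _hundreds[n // 100] + _tens[n // 10 % 10] + _ones[n % 10]
--
--
-- def _go(n, index):
--     # higher groups first (they form the prefix), then this thousands-group
--     if n == 0:
--         return ""
--     prefix = _go(n // 1000, index + 1)
--     if n % 1000 == 0:
--         return prefix
--     current = _group(n % 1000)
--     if index > 0:
--         current += _thousands[index]
--     return prefix + current
--
--
-- def convert(number):
--     if number == 0:
--         return "ཀླད་ཀོར་"
--     if number < 0:
--         return "ཉུང་ཤོས་" + convert(-number)
--     return _go(number, 0)
-- ===== Notes on version B (the rewrite author's own statement) =====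
-- stated objective: alternative
-- what changed: Replaces the while-loop that accumulates thousands-groups in a list and joins their reversal with a top-down recursion producing the prefix first, and replaces the branching recursive sub-thousand converter with a branch-free per-digit triple table lookup.
import Mathlib
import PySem

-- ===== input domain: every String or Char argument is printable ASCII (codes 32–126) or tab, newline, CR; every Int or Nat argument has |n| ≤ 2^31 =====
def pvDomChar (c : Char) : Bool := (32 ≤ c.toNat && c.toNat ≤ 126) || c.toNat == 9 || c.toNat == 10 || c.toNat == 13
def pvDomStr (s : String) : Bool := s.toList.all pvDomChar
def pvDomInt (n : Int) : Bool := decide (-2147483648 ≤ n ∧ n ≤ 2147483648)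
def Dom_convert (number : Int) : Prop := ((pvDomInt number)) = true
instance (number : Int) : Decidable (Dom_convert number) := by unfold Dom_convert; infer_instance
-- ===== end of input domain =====

-- B replaces A's list-and-reverse while-loop by a prefix-first recursion and the
-- recursive sub-thousand converter by a per-digit table lookup (alternative, same cost).

-- shared module-level tables
def onesT : List String := ["", "ཞིག་", "གཉིས་", "གསུམ་", "བཞི་", "ལྔ་", "དྲུག་", "བདུན་", "བརྒྱད་", "དགུ་"]
def tensT : List String := ["", "བཅུ་", "ཉི་ཤུ་", "སུམ་ཅུ་", "བཞི་བཅུ་", "ལྔ་བཅུ་", "དྲུག་ཅུ་", "བདུན་ཅུ་", "བརྒྱད་ཅུ་", "དགུ་བཅུ་"]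
def hundredsT : List String := ["", "བརྒྱ་", "ཉིས་བརྒྱ་", "སུམ་བརྒྱ་", "བཞི་བརྒྱ་", "ལྔ་བརྒྱ་", "དྲུག་བརྒྱ་", "བདུན་བརྒྱ་", "བརྒྱད་བརྒྱ་", "དགུ་བརྒྱ་"]
def thousandsT : List String := ["", "སྟོང་", "ཁྲི་", "འབུམ་", "ས་ཡ་", "བྱེ་བ་", "དུང་ཕྱུར་", "ས་ཡ་ཕྲག་", "བྱེ་བ་ཕྲག་", "དུང་ཕྱུར་ཕྲག་"]

-- ===== PORT A =====
-- convert_less_than_thousand; the argument is always a nonnegative int (number % 1000),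
-- so it is carried as a Nat; the in-range list indexings are getD.
def cltA (n : Nat) : String :=
  if n < 10 then onesT.getD n ""
  else if n < 100 then
    if n % 10 = 0 then tensT.getD (n / 10) ""
    else tensT.getD (n / 10) "" ++ onesT.getD (n % 10) ""
  else
    if n % 100 = 0 then hundredsT.getD (n / 100) ""
    else hundredsT.getD (n / 100) "" ++ cltA (n % 100)
termination_by n
decreasing_by omega

-- the while-loop of A: state (number, thousand_index, parts)
def loopA (n : Nat) (idx : Nat) (parts : List String) : List String :=
  if n = 0 then parts
  else
    loopA (n / 1000) (idx + 1)
      (if n % 1000 ≠ 0 then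
         parts ++ [cltA (n % 1000) ++ (if idx > 0 then thousandsT.getD idx "" else "")]
       else parts)
termination_by n
decreasing_by omega

def convertPosA (n : Nat) : String := PySem.Str.join "" (loopA n 0 []).reverse

-- the single-level recursive call convert(-number) lands in the positive branch,
-- so it is inlined as convertPosA of the (positive) negation
def convert (number : Int) : String :=
  if number = 0 then "ཀླད་ཀོར་"
  else if number < 0 then "ཉུང་ཤོས་" ++ convertPosA (-number).toNat
  else convertPosA number.toNat

-- ===== PORT B =====
def groupB (n : Nat) : String :=
  hundredsT.getD (n / 100) "" ++ tensT.getD (n / 10 % 10) "" ++ onesT.getD (n % 10) ""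

def goB (n : Nat) (idx : Nat) : String :=
  if n = 0 then ""
  else
    goB (n / 1000) (idx + 1) ++
      (if n % 1000 = 0 then ""
       else groupB (n % 1000) ++ (if idx > 0 then thousandsT.getD idx "" else ""))
termination_by n
decreasing_by omega

def convert_alt (number : Int) : String :=
  if number = 0 then "ཀླད་ཀོར་"
  else if number < 0 then "ཉུང་ཤོས་" ++ goB (-number).toNat 0
  else goB number.toNat 0

-- ===== PRECONDITION & SPEC =====
def Spec_convert (number : Int) (out : String) : Prop := out = convert_alt number
instance (number : Int) (out : String) : Decidable (Spec_convert number out) := by unfold Spec_convert; infer_instance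

-- ===== CLAIM (what is proved, stated in full; the proofs are below) =====
def Claim_equal_convert : Prop := ∀ (number : Int), Dom_convert number → Spec_convert number (convert number)

-- ===== LEMMAS AND PROOFS =====

theorem strJoin_empty_nil : PySem.Str.join "" ([] : List String) = "" := by
  simp [PySem.Str.join, PySem.Chars.join, List.intercalate]

theorem intercalate_nil_eq_flatten (l : List (List Char)) : List.intercalate ([] : List Char) l = l.flatten := by
  simp [List.intercalate]
  induction l with
  | nil => rfl
  | cons a l ih => cases l <;> simp_all [List.intersperse]

theorem strJoin_empty_cons (a : String) (l : List String) :
    PySem.Str.join "" (a :: l) = a ++ PySem.Str.join "" l := by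
  simp [PySem.Str.join, PySem.Chars.join, intercalate_nil_eq_flatten, String.ofList_append]

theorem clt_eq_group (n : Nat) (h : n < 1000) : cltA n = groupB n := by
  induction n using Nat.strong_induction_on with
  | _ n ih =>
    rw [cltA, groupB]
    by_cases h10 : n < 10
    · have e1 : n / 100 = 0 := by omega
      have e2 : n / 10 % 10 = 0 := by omega
      have e3 : n % 10 = n := by omega
      simp [h10, e1, e2, e3, hundredsT, tensT]
    · by_cases h100 : n < 100
      · have e1 : n / 100 = 0 := by omega
        have e2 : n / 10 % 10 = n / 10 := by omega
        simp only [if_neg h10, if_pos h100, e1, e2, hundredsT]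
        by_cases hz : n % 10 = 0
        · simp [hz, onesT]
        · simp [hz]
      · have e2 : n % 100 / 100 = 0 := by omega
        have e3 : n % 100 / 10 % 10 = n / 10 % 10 := by omega
        have e4 : n % 100 % 10 = n % 10 := by omega
        simp only [if_neg h10, if_neg h100]
        by_cases hz : n % 100 = 0
        · have z1 : n / 10 % 10 = 0 := by omega
          have z2 : n % 10 = 0 := by omega
          simp [hz, z1, z2, tensT, onesT]
        · rw [if_neg hz, ih (n % 100) (by omega) (by omega), groupB, e2, e3, e4]
          simp [hundredsT, String.append_assoc]

theorem loop_eq_go (n : Nat) (idx : Nat) (parts : List String) :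
    PySem.Str.join "" (loopA n idx parts).reverse = goB n idx ++ PySem.Str.join "" parts.reverse := by
  induction n using Nat.strong_induction_on generalizing idx parts with
  | _ n ih =>
    rw [loopA, goB]
    by_cases hz : n = 0
    · simp [hz]
    · rw [if_neg hz, if_neg hz, ih (n / 1000) (by omega)]
      by_cases hm : n % 1000 = 0
      · simp [hm]
      · have hlt : n % 1000 < 1000 := by omega
        simp only [hm, ne_eq, not_false_iff, if_pos,
          List.reverse_append, List.reverse_cons, List.reverse_nil, List.nil_append,
          List.singleton_append, strJoin_empty_cons, clt_eq_group _ hlt, if_false]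
        simp [String.append_assoc]

theorem pos_eq (n : Nat) : convertPosA n = goB n 0 := by
  have := loop_eq_go n 0 []
  simpa [convertPosA, strJoin_empty_nil] using this

-- ===== VERDICT (by name: the statement is the Claim_ definition above) =====
theorem convert_spec : Claim_equal_convert := by
  intro number _
  unfold Spec_convert convert convert_alt
  split_ifs <;> simp [pos_eq]
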